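-- pv_equiv track=rewrite | github.com/renta0426/NVIDIA-Nemotron-Model-Reasoning-Challenge | data/symbol_rule_analysis_2026-04-20/analyze_symbol_rules.py | core_render_numeric_tokens
-- ===== SOURCE A (Python) =====
-- def core_eval_numeric_value(expr_name: str, x: int, y: int) -> int | None:
--     if expr_name == "x":
--         return x
--     if expr_name == "y":
--         return y
--     if expr_name == "x+y":
--         return x + y
--     if expr_name == "x-y":
--         return x - y
--     if expr_name == "y-x":
--         return y - x
--     if expr_name == "abs(x-y)":
--         return abs(x - y)
--     if expr_name == "x*y":
--         return x * y
--     if expr_name == "x%y":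
--         return None if y == 0 else x % y
--     if expr_name == "y%x":
--         return None if x == 0 else y % x
--     if expr_name == "x//y":
--         return None if y == 0 else x // y
--     if expr_name == "y//x":
--         return None if x == 0 else y // x
--     raise KeyError(expr_name)
--
-- def core_render_numeric_tokens(expr_name: str, x: int, y: int) -> list[tuple[str, str]] | None:
--     value = core_eval_numeric_value(expr_name, x, y)
--     if value is None:
--         return None
--     tokens: list[tuple[str, str]] = []
--     if value < 0:
--         tokens.append(("sign", "-"))
--         value = -value
--     for digit in str(value):
--         tokens.append(("digit", digit))
--     return tokens
-- ===== SOURCE B (Python) =====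
-- _OPS = {
--     "x": lambda x, y: x,
--     "y": lambda x, y: y,
--     "x+y": lambda x, y: x + y,
--     "x-y": lambda x, y: x - y,
--     "y-x": lambda x, y: y - x,
--     "abs(x-y)": lambda x, y: abs(x - y),
--     "x*y": lambda x, y: x * y,
--     "x%y": lambda x, y: None if y == 0 else x % y,
--     "y%x": lambda x, y: None if x == 0 else y % x,
--     "x//y": lambda x, y: None if y == 0 else x // y,
--     "y//x": lambda x, y: None if x == 0 else y // x,
-- }
--
-- def core_render_numeric_tokens(expr_name, x, y):
--     value = _OPS[expr_name](x, y)
--     if value is None: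
--         return None
--     sign = []
--     if value < 0:
--         sign.append(("sign", "-"))
--         value = -value
--     if value == 0:
--         return sign + [("digit", "0")]
--     digits = []
--     while value:
--         digits.append(("digit", str(value % 10)))
--         value //= 10
--     return sign + digits[::-1]
-- ===== Notes on version B (the rewrite author's own statement) =====
-- stated objective: alternative
-- what changed: Replaces the if-chain eval with a dict-of-lambdas dispatch and replaces iteration over str(value) with arithmetic digit extraction (value % 10 / value //= 10, collected little-endian and reversed, 0 special-cased).
import Mathlib
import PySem

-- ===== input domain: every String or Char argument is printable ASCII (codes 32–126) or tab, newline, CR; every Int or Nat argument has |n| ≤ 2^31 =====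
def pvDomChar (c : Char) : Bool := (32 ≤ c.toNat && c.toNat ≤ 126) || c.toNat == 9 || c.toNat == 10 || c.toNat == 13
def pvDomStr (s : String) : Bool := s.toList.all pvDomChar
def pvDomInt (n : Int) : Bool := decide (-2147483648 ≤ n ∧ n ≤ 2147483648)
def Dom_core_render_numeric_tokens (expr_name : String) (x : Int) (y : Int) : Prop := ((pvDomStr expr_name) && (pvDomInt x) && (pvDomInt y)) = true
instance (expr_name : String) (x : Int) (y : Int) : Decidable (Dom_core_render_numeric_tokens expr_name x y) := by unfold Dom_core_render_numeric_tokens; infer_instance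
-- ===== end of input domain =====

-- B replaces A's if-chain eval with an op-table lookup and extracts digits arithmetically (% 10, // 10) instead of iterating over str(value); alternative decomposition, same cost.


-- ===== PORT A =====
-- core_eval_numeric_value: the final 'raise KeyError' is represented by none; Pre_ excludes that case.
def pvEvalA (expr_name : String) (x : Int) (y : Int) : Option Int :=
  if expr_name = "x" then some x
  else if expr_name = "y" then some y
  else if expr_name = "x+y" then some (x + y)
  else if expr_name = "x-y" then some (x - y)
  else if expr_name = "y-x" then some (y - x)
  else if expr_name = "abs(x-y)" then some |x - y|
  else if expr_name = "x*y" then some (x * y)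
  else if expr_name = "x%y" then (if y = 0 then none else some (PySem.Int.mod x y))
  else if expr_name = "y%x" then (if x = 0 then none else some (PySem.Int.mod y x))
  else if expr_name = "x//y" then (if y = 0 then none else some (PySem.Int.floordiv x y))
  else if expr_name = "y//x" then (if x = 0 then none else some (PySem.Int.floordiv y x))
  else none

def core_render_numeric_tokens (expr_name : String) (x : Int) (y : Int) : Option (List (String × String)) :=
  match pvEvalA expr_name x y with
  | none => none
  | some v =>
    -- tokens = []; if value < 0: append ("sign","-"), negate; for digit in str(value): append ("digit", digit)
    if v < 0 then
      some ((PySem.Int.toStr (-v)).toList.foldl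
        (fun acc c => acc ++ [("digit", String.mk [c])]) [("sign", "-")])
    else
      some ((PySem.Int.toStr v).toList.foldl
        (fun acc c => acc ++ [("digit", String.mk [c])]) [])

-- ===== PORT B =====
-- Source B's _OPS dict (literal, distinct keys) as an association list
def pvOps : List (String × (Int → Int → Option Int)) :=
  [("x", fun x _ => some x),
   ("y", fun _ y => some y),
   ("x+y", fun x y => some (x + y)),
   ("x-y", fun x y => some (x - y)),
   ("y-x", fun x y => some (y - x)),
   ("abs(x-y)", fun x y => some |x - y|),
   ("x*y", fun x y => some (x * y)),
   ("x%y", fun x y => if y = 0 then none else some (PySem.Int.mod x y)),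
   ("y%x", fun x y => if x = 0 then none else some (PySem.Int.mod y x)),
   ("x//y", fun x y => if y = 0 then none else some (PySem.Int.floordiv x y)),
   ("y//x", fun x y => if x = 0 then none else some (PySem.Int.floordiv y x))]

-- dict lookup _OPS[expr_name] (first match; none = KeyError, excluded by Pre_)
def pvLookup : List (String × (Int → Int → Option Int)) → String → Option (Int → Int → Option Int)
  | [], _ => none
  | (k, f) :: rest, e => if e = k then some f else pvLookup rest e

-- the 'while value: digits.append(("digit", str(value % 10))); value //= 10' loop (little-endian);
-- the guard is 'v ≤ 0' rather than 'v ≠ 0' only so the function is total (the loop runs on v > 0).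
def pvAltDigits (v : Int) : List (String × String) :=
  if _h : v ≤ 0 then []
  else ("digit", PySem.Int.toStr (PySem.Int.mod v 10)) :: pvAltDigits (PySem.Int.floordiv v 10)
termination_by v.toNat
decreasing_by
  have h1 : PySem.Int.floordiv v 10 < v := by
    rw [PySem.Int.floordiv_lt_iff_lt_mul (by norm_num)]
    nlinarith
  have h2 : (0:Int) ≤ PySem.Int.floordiv v 10 := by
    rw [PySem.Int.le_floordiv_iff_mul_le (by norm_num)]
    omega
  omega

def core_render_numeric_tokens_alt (expr_name : String) (x : Int) (y : Int) : Option (List (String × String)) :=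
  match pvLookup pvOps expr_name with
  | none => none
  | some op =>
    match op x y with
    | none => none
    | some v0 =>
      let sv : List (String × String) × Int :=
        if v0 < 0 then ([("sign", "-")], -v0) else ([], v0)
      if sv.2 = 0 then some (sv.1 ++ [("digit", "0")])
      else some (sv.1 ++ (pvAltDigits sv.2).reverse)

-- ===== PRECONDITION & SPEC =====
-- Pre_ excludes exactly the expression names on which A raises KeyError (and B raises KeyError too).
def Pre_core_render_numeric_tokens (expr_name : String) (x : Int) (y : Int) : Prop :=
  expr_name ∈ ["x", "y", "x+y", "x-y", "y-x", "abs(x-y)", "x*y", "x%y", "y%x", "x//y", "y//x"]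
instance (expr_name : String) (x : Int) (y : Int) : Decidable (Pre_core_render_numeric_tokens expr_name x y) := by unfold Pre_core_render_numeric_tokens; infer_instance

def pvWitness_core_render_numeric_tokens : String × Int × Int := ("x+y", 3, -14)

def Spec_core_render_numeric_tokens (expr_name : String) (x : Int) (y : Int) (out : Option (List (String × String))) : Prop := out = core_render_numeric_tokens_alt expr_name x y
instance (expr_name : String) (x : Int) (y : Int) (out : Option (List (String × String))) : Decidable (Spec_core_render_numeric_tokens expr_name x y out) := by unfold Spec_core_render_numeric_tokens; infer_instance

-- ===== CLAIM (what is proved, stated in full; the proofs are below) =====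
def Claim_equal_core_render_numeric_tokens : Prop := ∀ (expr_name : String) (x : Int) (y : Int), Dom_core_render_numeric_tokens expr_name x y → Pre_core_render_numeric_tokens expr_name x y → Spec_core_render_numeric_tokens expr_name x y (core_render_numeric_tokens expr_name x y)

-- ===== LEMMAS AND PROOFS =====

-- little-endian digit characters of a Nat
def pvCharsRev : Nat → List Char
  | 0 => []
  | n+1 => Nat.digitChar ((n+1) % 10) :: pvCharsRev ((n+1) / 10)
decreasing_by exact Nat.div_lt_self (Nat.succ_pos _) (by norm_num)

lemma pvToDigitsCore_eq (n : Nat) (hn : 0 < n) :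
    ∀ fuel, n ≤ fuel → ∀ ds, Nat.toDigitsCore 10 fuel n ds = (pvCharsRev n).reverse ++ ds := by
  induction n using Nat.strong_induction_on with
  | _ n ih =>
    intro fuel hfuel ds
    cases fuel with
    | zero => omega
    | succ f =>
      obtain ⟨m, rfl⟩ : ∃ m, n = m + 1 := ⟨n - 1, by omega⟩
      by_cases h0 : (m + 1) / 10 = 0
      · simp only [Nat.toDigitsCore, h0, if_pos]
        rw [pvCharsRev, h0, pvCharsRev]
        simp
      · simp only [Nat.toDigitsCore]
        rw [if_neg h0]
        have hlt : (m + 1) / 10 < m + 1 := Nat.div_lt_self (Nat.succ_pos _) (by norm_num)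
        rw [ih ((m + 1) / 10) hlt (by omega) f (by omega)]
        rw [pvCharsRev]
        simp

lemma pvToStr_digit (d : Nat) (hd : d < 10) :
    PySem.Int.toStr (d : Int) = String.mk [Nat.digitChar d] := by
  interval_cases d <;> rfl

lemma pvAltDigits_eq (n : Nat) (hn : 0 < n) :
    pvAltDigits (n : Int) = (pvCharsRev n).map (fun c => ("digit", String.mk [c])) := by
  induction n using Nat.strong_induction_on with
  | _ n ih =>
    have hfd : PySem.Int.floordiv (n : Int) 10 = ((n / 10 : Nat) : Int) := by
      exact_mod_cast PySem.Int.floordiv_natCast n 10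
    have hmd : PySem.Int.mod (n : Int) 10 = ((n % 10 : Nat) : Int) := by
      exact_mod_cast PySem.Int.mod_natCast n 10
    rw [pvAltDigits, dif_neg (by omega : ¬ (n : Int) ≤ 0), hfd, hmd]
    obtain ⟨m, rfl⟩ : ∃ m, n = m + 1 := ⟨n - 1, by omega⟩
    rw [pvCharsRev]
    rw [pvToStr_digit ((m + 1) % 10) (Nat.mod_lt _ (by norm_num))]
    simp only [List.map_cons]
    refine congrArg₂ _ rfl ?_
    by_cases h0 : (m + 1) / 10 = 0
    · rw [h0, pvCharsRev]
      simp [pvAltDigits]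
    · exact ih ((m + 1) / 10) (Nat.div_lt_self (Nat.succ_pos _) (by norm_num)) (by omega)

lemma pvFoldl_app (l : List Char) (t : List (String × String)) :
    l.foldl (fun acc c => acc ++ [("digit", String.mk [c])]) t
      = t ++ l.map (fun c => ("digit", String.mk [c])) := by
  induction l generalizing t with
  | nil => simp
  | cons c cs ih => simp [ih]

-- nonnegative render agreement: A's string loop = B's arithmetic loop
lemma pvRender_nonneg (v : Int) (hv : 0 ≤ v) (t : List (String × String)) :
    (PySem.Int.toStr v).toList.foldl (fun acc c => acc ++ [("digit", String.mk [c])]) t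
      = if v = 0 then t ++ [("digit", "0")] else t ++ (pvAltDigits v).reverse := by
  rw [PySem.Int.toList_toStr]
  rw [show PySem.Int.toChars v = Nat.toDigits 10 v.toNat by
    unfold PySem.Int.toChars; rw [if_neg (by omega)]]
  by_cases h0 : v = 0
  · subst h0
    rw [if_pos rfl]
    simp only [Nat.toDigits, Nat.toDigitsCore]
    rw [pvFoldl_app]
    have : String.mk [Nat.digitChar 0] = "0" := by decide
    simp [this]
  · rw [if_neg h0]
    have hn : 0 < v.toNat := by omega
    rw [Nat.toDigits, pvToDigitsCore_eq v.toNat hn (v.toNat + 1) (by omega) []]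
    rw [List.append_nil, pvFoldl_app, List.map_reverse]
    rw [← pvAltDigits_eq v.toNat hn, Int.toNat_of_nonneg hv]

lemma pvRender_eq (o : Option Int) :
    (match o with
     | none => none
     | some v =>
       if v < 0 then
         some ((PySem.Int.toStr (-v)).toList.foldl
           (fun acc c => acc ++ [("digit", String.mk [c])]) [("sign", "-")])
       else
         some ((PySem.Int.toStr v).toList.foldl
           (fun acc c => acc ++ [("digit", String.mk [c])]) []))
    = (match o with
       | none => none
       | some v0 =>
         let sv : List (String × String) × Int :=
           if v0 < 0 then ([("sign", "-")], -v0) else ([], v0)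
         if sv.2 = 0 then some (sv.1 ++ [("digit", "0")])
         else some (sv.1 ++ (pvAltDigits sv.2).reverse)) := by
  cases o with
  | none => rfl
  | some v =>
    simp only
    by_cases hneg : v < 0
    · rw [if_pos hneg, if_pos hneg]
      rw [pvRender_nonneg (-v) (by omega)]
      rw [if_neg (by omega : ¬ (-v) = 0), if_neg (by omega : ¬ (-v) = 0)]
    · rw [if_neg hneg, if_neg hneg]
      rw [pvRender_nonneg v (by omega)]
      by_cases h0 : v = 0 <;> simp [h0]

-- ===== VERDICT (by name: the statement is the Claim_ definition above) =====
theorem core_render_numeric_tokens_spec : Claim_equal_core_render_numeric_tokens := by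
  intro e x y _ hpre
  unfold Spec_core_render_numeric_tokens
  unfold core_render_numeric_tokens core_render_numeric_tokens_alt
  have hev : pvEvalA e x y
      = (match pvLookup pvOps e with | none => none | some f => f x y) := by
    unfold Pre_core_render_numeric_tokens at hpre
    simp only [List.mem_cons, List.not_mem_nil, or_false] at hpre
    rcases hpre with rfl | rfl | rfl | rfl | rfl | rfl | rfl | rfl | rfl | rfl | rfl <;> rfl
  rw [hev]
  cases hl : pvLookup pvOps e with
  | none => rfl
  | some op => exact pvRender_eq (op x y)
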